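-- pv_equiv track=rewrite | github.com/Rukhan4/Bioinformatics-work | Biology Meets Programming/BMPwk2.py | SkewArray
-- ===== SOURCE A (Python) =====
-- def SkewArray(Genome):
--     Skew = [0]
--     for i in range(len(Genome)):
--         if Genome[i] == 'C':
--             Skew.append(Skew[i] - 1)
--         elif Genome[i] == 'G':
--             Skew.append(Skew[i] + 1)
--         else:
--             Skew.append(Skew[i])
--     return Skew
-- ===== SOURCE B (Python) =====
-- def SkewArray(Genome):
--     # Event-driven run-length construction: the skew is constant between
--     # C/G positions, so only those positions trigger work; each constant
--     # stretch is emitted at once with list multiplication.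
--     res = []
--     val = 0
--     start = 0
--     for j, ch in enumerate(Genome):
--         if ch == 'C' or ch == 'G':
--             res += [val] * (j + 1 - start)
--             val = val + (1 if ch == 'G' else -1)
--             start = j + 1
--     res += [val] * (len(Genome) + 1 - start)
--     return res
-- ===== Notes on version B (the rewrite author's own statement) =====
-- stated objective: alternative
-- what changed: Replaces the per-position self-referential append loop (Skew.append(Skew[i]+/-1)) by an event-driven run-length construction: only 'C'/'G' positions trigger work, and each constant stretch of the skew between events is emitted at once with list multiplication.
import Mathlib
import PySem

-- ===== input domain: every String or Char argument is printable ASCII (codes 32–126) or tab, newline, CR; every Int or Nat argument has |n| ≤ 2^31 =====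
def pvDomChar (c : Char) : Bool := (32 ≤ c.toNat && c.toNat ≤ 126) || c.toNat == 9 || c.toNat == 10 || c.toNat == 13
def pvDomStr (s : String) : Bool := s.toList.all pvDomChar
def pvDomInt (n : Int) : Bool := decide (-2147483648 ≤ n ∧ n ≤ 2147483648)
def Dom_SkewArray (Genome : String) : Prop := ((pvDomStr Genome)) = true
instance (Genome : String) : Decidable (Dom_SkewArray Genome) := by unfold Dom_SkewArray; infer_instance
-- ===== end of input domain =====

-- B replaces A's per-position self-referential append loop by an event-driven run-length
-- construction: only 'C'/'G' positions trigger work, each constant stretch of the skew is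
-- emitted at once with list multiplication; same O(n) cost, a different decomposition.

-- ===== PORT A =====
-- the loop indexes Genome[i] and Skew[i]; both indices are always in range, so pyGetD with a
-- dummy default is exact here
def SkewArray (Genome : String) : List Int :=
  (PySem.List.pyRange 0 (Genome.toList.length : Int) 1).foldl
    (fun Skew i =>
      if PySem.List.pyGetD Genome.toList i ' ' = 'C' then
        Skew ++ [PySem.List.pyGetD Skew i 0 - 1]
      else if PySem.List.pyGetD Genome.toList i ' ' = 'G' then
        Skew ++ [PySem.List.pyGetD Skew i 0 + 1]
      else
        Skew ++ [PySem.List.pyGetD Skew i 0])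
    [0]

-- ===== PORT B =====
-- state = (res, val, start); '[val] * n' is PySem.List.pyRepeat [val] n (exact: negative n → [])
def SkewArray_alt (Genome : String) : List Int :=
  let s := (PySem.List.enumerate Genome.toList 0).foldl
    (fun (st : List Int × Int × Int) p =>
      if p.2 = 'C' ∨ p.2 = 'G' then
        (st.1 ++ PySem.List.pyRepeat [st.2.1] (p.1 + 1 - st.2.2),
         st.2.1 + (if p.2 = 'G' then 1 else -1),
         p.1 + 1)
      else st)
    ([], 0, 0)
  s.1 ++ PySem.List.pyRepeat [s.2.1] ((Genome.toList.length : Int) + 1 - s.2.2)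

-- ===== PRECONDITION & SPEC =====
def Spec_SkewArray (Genome : String) (out : List Int) : Prop := out = SkewArray_alt Genome
instance (Genome : String) (out : List Int) : Decidable (Spec_SkewArray Genome out) := by unfold Spec_SkewArray; infer_instance

-- ===== CLAIM (what is proved, stated in full; the proofs are below) =====
def Claim_equal_SkewArray : Prop := ∀ (Genome : String), Dom_SkewArray Genome → Spec_SkewArray Genome (SkewArray Genome)

-- ===== LEMMAS AND PROOFS =====

def pvDelta (c : Char) : Int := if c = 'C' then -1 else if c = 'G' then 1 else 0

lemma pv_scanl_concat (ds : List Int) (a d : Int) :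
    List.scanl (· + ·) a (ds ++ [d]) = List.scanl (· + ·) a ds ++ [ds.foldl (· + ·) a + d] := by
  induction ds generalizing a with
  | nil => simp
  | cons x xs ih => simp [List.scanl_cons, ih]

lemma pv_scanl_getD_length (ds : List Int) (a : Int) :
    (List.scanl (· + ·) a ds).getD ds.length 0 = ds.foldl (· + ·) a := by
  induction ds generalizing a with
  | nil => simp
  | cons x xs ih => simp [List.scanl_cons]

-- A's fold computes the prefix-sum (scanl) of the per-base deltas
lemma pv_main (l : List Char) :
    (PySem.List.pyRange 0 (l.length : Int) 1).foldl
      (fun Skew i =>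
        if PySem.List.pyGetD l i ' ' = 'C' then
          Skew ++ [PySem.List.pyGetD Skew i 0 - 1]
        else if PySem.List.pyGetD l i ' ' = 'G' then
          Skew ++ [PySem.List.pyGetD Skew i 0 + 1]
        else
          Skew ++ [PySem.List.pyGetD Skew i 0])
      [0]
    = List.scanl (· + ·) 0 (l.map pvDelta) := by
  induction l using List.reverseRecOn with
  | nil => simp [PySem.List.pyRange_one_eq_nil, List.scanl]
  | append_singleton l c ih =>
    have hlen : ((l ++ [c]).length : Int) = (l.length : Int) + 1 := by
      simp
    rw [hlen, PySem.List.pyRange_one_succ_right (by positivity), List.foldl_append]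
    have hcongr :
        (PySem.List.pyRange 0 (l.length : Int) 1).foldl
          (fun Skew i =>
            if PySem.List.pyGetD (l ++ [c]) i ' ' = 'C' then
              Skew ++ [PySem.List.pyGetD Skew i 0 - 1]
            else if PySem.List.pyGetD (l ++ [c]) i ' ' = 'G' then
              Skew ++ [PySem.List.pyGetD Skew i 0 + 1]
            else
              Skew ++ [PySem.List.pyGetD Skew i 0])
          ([0] : List Int)
        = (PySem.List.pyRange 0 (l.length : Int) 1).foldl
          (fun Skew i =>
            if PySem.List.pyGetD l i ' ' = 'C' then
              Skew ++ [PySem.List.pyGetD Skew i 0 - 1]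
            else if PySem.List.pyGetD l i ' ' = 'G' then
              Skew ++ [PySem.List.pyGetD Skew i 0 + 1]
            else
              Skew ++ [PySem.List.pyGetD Skew i 0])
          ([0] : List Int) := by
      apply PySem.List.foldl_congr_mem
      intro Skew i hi
      have hib := (PySem.List.mem_pyRange_one).1 hi
      obtain ⟨k, hk, rfl⟩ : ∃ k : Nat, k < l.length ∧ (i = (k : Int)) := by
        refine ⟨i.toNat, by omega, by omega⟩
      have : PySem.List.pyGetD (l ++ [c]) (k : Int) ' ' = PySem.List.pyGetD l (k : Int) ' ' := by
        simp [PySem.List.pyGetD_natCast, List.getD_eq_getElem?_getD, List.getElem?_append_left hk]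
      rw [this]
    rw [hcongr, ih]
    have hc : PySem.List.pyGetD (l ++ [c]) (l.length : Int) ' ' = c := by
      simp [PySem.List.pyGetD_natCast, List.getD_eq_getElem?_getD]
    have hlast :
        PySem.List.pyGetD (List.scanl (· + ·) 0 (l.map pvDelta)) (l.length : Int) 0
          = (l.map pvDelta).foldl (· + ·) 0 := by
      have := pv_scanl_getD_length (l.map pvDelta) 0
      simpa [PySem.List.pyGetD_natCast] using this
    have hscan :
        List.scanl (· + ·) 0 ((l ++ [c]).map pvDelta)
          = List.scanl (· + ·) 0 (l.map pvDelta) ++ [(l.map pvDelta).foldl (· + ·) 0 + pvDelta c] := by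
      simp [pv_scanl_concat]
    simp only [List.foldl_cons, List.foldl_nil]
    rw [hscan, hc, hlast]
    by_cases h1 : c = 'C'
    · simp [h1, pvDelta, sub_eq_add_neg]
    · by_cases h2 : c = 'G'
      · simp [h2, pvDelta]
      · simp [h1, h2, pvDelta]

-- B's run-fill fold also computes the scanl of the deltas: invariant over the suffix
lemma pv_alt (t : List Char) (j : Nat) (res : List Int) (val : Int) (start : Nat)
    (h : start ≤ j) :
    (let s := (PySem.List.enumerate t (j : Int)).foldl
        (fun (st : List Int × Int × Int) p =>
          if p.2 = 'C' ∨ p.2 = 'G' then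
            (st.1 ++ PySem.List.pyRepeat [st.2.1] (p.1 + 1 - st.2.2),
             st.2.1 + (if p.2 = 'G' then 1 else -1),
             p.1 + 1)
          else st)
        (res, val, (start : Int));
      s.1 ++ PySem.List.pyRepeat [s.2.1] (((j + t.length : Nat) : Int) + 1 - s.2.2))
    = res ++ List.replicate (j - start) val ++ List.scanl (· + ·) val (t.map pvDelta) := by
  induction t generalizing j res val start with
  | nil =>
    simp only [PySem.List.enumerate_nil, List.foldl_nil, List.length_nil, Nat.add_zero,
      List.map_nil, List.scanl]
    rw [PySem.List.pyRepeat_singleton]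
    have h1 : (((j : Nat) : Int) + 1 - (start : Int)).toNat = (j - start) + 1 := by omega
    rw [h1, List.replicate_succ']
    simp
  | cons c t ih =>
    rw [PySem.List.enumerate_cons, List.foldl_cons]
    by_cases hc : c = 'C' ∨ c = 'G'
    · simp only [hc, if_pos]
      have hrep : PySem.List.pyRepeat [val] ((j : Int) + 1 - (start : Int))
          = List.replicate (j + 1 - start) val := by
        rw [PySem.List.pyRepeat_singleton]; congr 1; omega
      have hst : ((j : Int) + 1) = (((j + 1 : Nat)) : Int) := by push_cast; ring
      rw [hrep, hst]
      have := ih (j + 1) (res ++ List.replicate (j + 1 - start) val)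
        (val + (if c = 'G' then 1 else -1)) (j + 1) (le_refl _)
      simp only [Nat.sub_self, List.replicate_zero, List.append_nil] at this
      have hlen : (j + 1) + t.length = j + (c :: t).length := by simp; ring
      rw [hlen] at this
      rw [this]
      have hd : pvDelta c = (if c = 'G' then 1 else -1) := by
        rcases hc with hc | hc <;> simp [hc, pvDelta]
      have hsplit : List.replicate (j + 1 - start) val
          = List.replicate (j - start) val ++ [val] := by
        have : j + 1 - start = (j - start) + 1 := by omega
        rw [this, List.replicate_succ']
      simp [List.map_cons, List.scanl_cons, hd, hsplit]
    · simp only [hc, if_neg, not_false_iff]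
      have hst : ((j : Int) + 1) = (((j + 1 : Nat)) : Int) := by push_cast; ring
      rw [hst]
      have := ih (j + 1) res val start (by omega)
      have hlen : (j + 1) + t.length = j + (c :: t).length := by simp; ring
      rw [hlen] at this
      rw [this]
      have hd : pvDelta c = 0 := by
        simp only [not_or] at hc
        simp [pvDelta, hc.1, hc.2]
      have hsplit : List.replicate (j + 1 - start) val
          = List.replicate (j - start) val ++ [val] := by
        have : j + 1 - start = (j - start) + 1 := by omega
        rw [this, List.replicate_succ']
      simp [List.map_cons, List.scanl_cons, hd, hsplit]

lemma pv_alt_scanl (Genome : String) :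
    SkewArray_alt Genome = List.scanl (· + ·) 0 (Genome.toList.map pvDelta) := by
  have := pv_alt Genome.toList 0 [] 0 0 (le_refl 0)
  simpa [SkewArray_alt] using this

-- ===== VERDICT (by name: the statement is the Claim_ definition above) =====
theorem SkewArray_spec : Claim_equal_SkewArray := by
  intro Genome _
  unfold Spec_SkewArray
  have hb := pv_alt_scanl Genome
  have ha : SkewArray Genome = List.scanl (· + ·) 0 (Genome.toList.map pvDelta) := by
    simpa [SkewArray, pvDelta] using pv_main Genome.toList
  rw [ha, hb]
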